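-- pv_equiv track=rewrite | github.com/wherby/code | algorithm/mathA/gcd/数论GCD/gcd倍数容斥.py | countCoprime
-- ===== SOURCE A (Python) =====
-- from typing import List, Tuple, Optional
--
-- def countCoprime(mat: List[List[int]]) -> int:
--     m,n =len(mat),len(mat[0])
--     mod =10**9+7
--     mx = max([max(a) for a in mat])
--     dp = [0]*(mx+1)
--     for j in range(mx,0,-1):
--         cur = 1
--         for i in range(m):
--             c1 = 0
--             for b in mat[i]:
--                 if b % j ==0:
--                     c1 +=1
--             cur = cur*c1%mod
--         for k in range(j*2,mx+1,j):
--             cur = cur -dp[k]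
--         dp[j] = cur%mod
--     return dp[1]
-- ===== SOURCE B (Python) =====
-- def countCoprime(mat):
--     mod = 10 ** 9 + 7
--     mx = max(max(row) for row in mat)
--     # c[j] = entries of the row divisible by j, built by enumerating each entry's
--     # divisors once (divisors come in pairs d, v//d with d*d <= v); 0 is divisible by every j
--     cnt = []
--     for row in mat:
--         c = [0] * (mx + 1)
--         for b in row:
--             v = abs(b)
--             if v == 0:
--                 for d in range(1, mx + 1):
--                     c[d] += 1
--             else:
--                 d = 1
--                 while d * d <= v:
--                     if v % d == 0:
--                         if d <= mx:
--                             c[d] += 1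
--                         e = v // d
--                         if e != d and e <= mx:
--                             c[e] += 1
--                     d += 1
--         cnt.append(c)
--     # inclusion-exclusion over the divisor lattice
--     dp = [0] * (mx + 1)
--     for j in range(mx, 0, -1):
--         cur = 1
--         for c in cnt:
--             cur = cur * c[j] % mod
--         for k in range(j * 2, mx + 1, j):
--             cur = cur - dp[k]
--         dp[j] = cur % mod
--     return dp[1]
-- ===== Notes on version B (the rewrite author's own statement) =====
-- stated objective: faster
-- what changed: Instead of rescanning every matrix entry for every divisor j (one trial division per (j,row,entry) triple), B enumerates each entry's divisors once in pairs (d, v//d) with d*d <= v into a per-row count array, then runs the same inclusion-exclusion dp; Pre_ excludes the inputs where A raises (empty matrix, an empty row, or max entry < 1, where max()/dp[1] raise).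
import Mathlib
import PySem

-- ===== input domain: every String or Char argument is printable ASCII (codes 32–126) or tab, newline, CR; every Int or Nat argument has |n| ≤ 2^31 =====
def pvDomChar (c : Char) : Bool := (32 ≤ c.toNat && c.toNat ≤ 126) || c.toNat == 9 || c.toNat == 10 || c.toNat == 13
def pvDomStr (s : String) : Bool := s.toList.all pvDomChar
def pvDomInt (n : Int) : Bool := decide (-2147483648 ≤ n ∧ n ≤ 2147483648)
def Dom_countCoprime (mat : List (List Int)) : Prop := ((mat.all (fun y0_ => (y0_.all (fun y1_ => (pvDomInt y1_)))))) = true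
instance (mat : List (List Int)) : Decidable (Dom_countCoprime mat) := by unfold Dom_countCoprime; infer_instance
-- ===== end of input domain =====

-- B replaces A's per-divisor rescan of every matrix entry (one divisibility test per
-- (divisor, row, entry) triple) by enumerating each entry's divisors once, in pairs
-- (d, v//d) with d*d ≤ v, into a per-row count array feeding the same inclusion-exclusion dp.

-- a Python list used as a mutable int array: O(1) read/write (exact for the nonnegative
-- in-range indices these ports use; pvAGet reads 0 and pvASet drops the write out of range)
def pvAGet (a : Array Int) (i : Int) : Int := (a[i.toNat]?).getD 0
def pvASet (a : Array Int) (i : Int) (v : Int) : Array Int := a.setIfInBounds i.toNat v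

-- mx = max([max(a) for a in mat]) — identical expression in both Python sources
def pvMx (mat : List (List Int)) : Int :=
  (PySem.List.max? (mat.map (fun a => (PySem.List.max? a (fun y => y)).getD 0)) (fun y => y)).getD 0

-- ===== PORT A =====
def countCoprime (mat : List (List Int)) : Int :=
  let m : Int := PySem.List.len mat
  let _n : Int := PySem.List.len (PySem.List.pyGetD mat 0 [])
  let mx : Int := pvMx mat
  let dp0 : Array Int := Array.replicate (mx + 1).toNat 0
  let dp := (PySem.List.pyRange mx 0 (-1)).foldl (fun dp j =>
    let cur : Int := (PySem.List.pyRange 0 m 1).foldl (fun cur i =>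
      let c1 : Int := (PySem.List.pyGetD mat i []).foldl
        (fun c1 b => if PySem.Int.mod b j = 0 then c1 + 1 else c1) 0
      PySem.Int.mod (cur * c1) 1000000007) 1
    let cur := (PySem.List.pyRange (j * 2) (mx + 1) j).foldl
      (fun cur k => cur - pvAGet dp k) cur
    pvASet dp j (PySem.Int.mod cur 1000000007)) dp0
  pvAGet dp 1

-- ===== PORT B =====
-- termination measure of the 'while d * d <= v' loop (cited by pvDivLoop's decreasing_by)
lemma pv_meas (v d : Int) (h : d * d ≤ v) : (v + 1 - (d + 1)).toNat < (v + 1 - d).toNat := by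
  by_cases hd : d ≤ 0
  · have h2 : 0 ≤ d * d := mul_self_nonneg d
    omega
  · have h2 : d ≤ d * d := le_mul_of_one_le_left (by omega) (by omega)
    omega

-- loop body: if v % d == 0: c[d] += 1 (if d <= mx); e = v // d; if e != d and e <= mx: c[e] += 1
def pvDivStep (mx v : Int) (c : Array Int) (d : Int) : Array Int :=
  if PySem.Int.mod v d = 0 then
    let ca : Array Int :=
      if d ≤ mx then pvASet c d (pvAGet c d + 1) else c
    if PySem.Int.floordiv v d ≠ d ∧ PySem.Int.floordiv v d ≤ mx then
      pvASet ca (PySem.Int.floordiv v d) (pvAGet ca (PySem.Int.floordiv v d) + 1)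
    else ca
  else c

-- while d * d <= v: <pvDivStep>; d += 1
def pvDivLoop (mx v : Int) (c : Array Int) (d : Int) : Array Int :=
  if h : d * d ≤ v then pvDivLoop mx v (pvDivStep mx v c d) (d + 1) else c
termination_by (v + 1 - d).toNat
decreasing_by exact pv_meas v d h

-- per entry: v = abs(b); if v == 0: every 1 <= d <= mx counts; else enumerate v's divisors
def pvElemStep (mx : Int) (c : Array Int) (b : Int) : Array Int :=
  if |b| = 0 then
    (PySem.List.pyRange 1 (mx + 1) 1).foldl
      (fun c d => pvASet c d (pvAGet c d + 1)) c
  else pvDivLoop mx |b| c 1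

def countCoprime_alt (mat : List (List Int)) : Int :=
  let mx : Int := pvMx mat
  let cnt : List (Array Int) := mat.foldl
    (fun cnt row => cnt ++ [row.foldl (pvElemStep mx) (Array.replicate (mx + 1).toNat 0)]) []
  let dp0 : Array Int := Array.replicate (mx + 1).toNat 0
  let dp := (PySem.List.pyRange mx 0 (-1)).foldl (fun dp j =>
    let cur : Int := cnt.foldl
      (fun cur c => PySem.Int.mod (cur * pvAGet c j) 1000000007) 1
    let cur := (PySem.List.pyRange (j * 2) (mx + 1) j).foldl
      (fun cur k => cur - pvAGet dp k) cur
    pvASet dp j (PySem.Int.mod cur 1000000007)) dp0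
  pvAGet dp 1

-- ===== PRECONDITION & SPEC =====
-- Pre_ excludes exactly the inputs on which the Python A raises: an empty matrix or an
-- empty row (max() of an empty sequence raises ValueError/IndexError), and matrices whose
-- maximum entry is < 1 (then dp has length ≤ 1 and 'dp[1]' raises IndexError).
def Pre_countCoprime (mat : List (List Int)) : Prop :=
  mat ≠ [] ∧ (∀ row ∈ mat, row ≠ []) ∧ ∃ row ∈ mat, ∃ b ∈ row, 1 ≤ b
instance (mat : List (List Int)) : Decidable (Pre_countCoprime mat) := by
  unfold Pre_countCoprime; infer_instance

def pvWitness_countCoprime : List (List Int) := [[2, 3], [1]]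

def Spec_countCoprime (mat : List (List Int)) (out : Int) : Prop := out = countCoprime_alt mat
instance (mat : List (List Int)) (out : Int) : Decidable (Spec_countCoprime mat out) := by
  unfold Spec_countCoprime; infer_instance

-- ===== CLAIM (what is proved, stated in full; the proofs are below) =====
def Claim_equal_countCoprime : Prop := ∀ (mat : List (List Int)), Dom_countCoprime mat →
  Pre_countCoprime mat → Spec_countCoprime mat (countCoprime mat)

-- ===== LEMMAS AND PROOFS =====

-- point update vs read, Int indices
lemma pv_get_set (a : Array Int) (p k v : Int)
    (h0 : 0 ≤ p) (hp : p < (a.size : Int)) (hk : 0 ≤ k) :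
    pvAGet (pvASet a p v) k = if k = p then v else pvAGet a k := by
  unfold pvAGet pvASet
  rw [Array.getElem?_setIfInBounds]
  by_cases h : k = p
  · rw [if_pos (by omega : p.toNat = k.toNat), if_pos (by omega), if_pos h]
    rfl
  · rw [if_neg (by omega : ¬ p.toNat = k.toNat), if_neg h]

lemma pv_get_replicate (n : Nat) (k : Int) : pvAGet (Array.replicate n 0) k = 0 := by
  unfold pvAGet
  rw [Array.getElem?_replicate]
  split_ifs <;> rfl

lemma pv_mem_mult {j top x : Int} (hj : 1 ≤ j) :
    x ∈ PySem.List.pyRange j (top + 1) j ↔ j ≤ x ∧ x ≤ top ∧ j ∣ x := by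
  rw [PySem.List.mem_pyRange_iff_of_pos (by omega)]
  constructor
  · rintro ⟨h1, h2, h3⟩
    refine ⟨h1, by omega, ?_⟩
    have := dvd_add h3 (dvd_refl j)
    simpa using this
  · rintro ⟨h1, h2, h3⟩
    exact ⟨h1, by omega, dvd_sub h3 (dvd_refl j)⟩

lemma pv_nodup_mult (j top : Int) (hj : 0 < j) :
    (PySem.List.pyRange j (top + 1) j).Nodup := by
  rw [PySem.List.pyRange_of_pos j (top + 1) hj]
  refine List.Nodup.map ?_ List.nodup_range
  intro a b hab
  simp only at hab
  have : (a : Int) = b := mul_left_cancel₀ (by omega : j ≠ 0) (by omega)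
  omega

-- exact division: v = j * q, j ≥ 1 ⇒ v // j = q
lemma pv_fdiv_exact {v j : Int} (hj : 1 ≤ j) (q : Int) (hq : v = j * q) :
    PySem.Int.floordiv v j = q := by
  rw [PySem.Int.floordiv_eq_iff_of_pos (by omega : (0:Int) < j)]
  constructor <;> nlinarith

-- the unique loop index that records divisor j of v: j itself if j*j ≤ v, else v // j
def pvRep (v j : Int) : Int := if j * j ≤ v then j else PySem.Int.floordiv v j

-- past the loop bound, no divisor of v is recorded any more
lemma pv_tail_zero {v j d : Int} (hv : 1 ≤ v) (hj1 : 1 ≤ j) (hd : 1 ≤ d)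
    (hg : ¬ d * d ≤ v) : ¬ (j ∣ v ∧ d ≤ pvRep v j) := by
  rintro ⟨hdvd, hrep⟩
  unfold pvRep at hrep
  by_cases hjj : j * j ≤ v
  · rw [if_pos hjj] at hrep
    exact hg (le_trans (mul_le_mul hrep hrep (by omega) (by omega)) hjj)
  · rw [if_neg hjj] at hrep
    obtain ⟨q, hq⟩ := hdvd
    rw [pv_fdiv_exact hj1 q hq] at hrep
    have h0 : 0 < j * q := by rw [← hq]; omega
    rcases mul_pos_iff.mp h0 with ⟨_, hqpos⟩ | ⟨hjneg, _⟩
    · have hqj : q ≤ j := by nlinarith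
      exact hg (by nlinarith)
    · omega

lemma pv_step_len (mx v : Int) (c : Array Int) (d : Int) :
    (pvDivStep mx v c d).size = c.size := by
  unfold pvDivStep pvASet
  split_ifs <;> simp [Array.size_setIfInBounds]

-- one loop iteration adds the indicator 'j divides v and j's recording index is d'
lemma pv_step_get (mx v j d : Int) (hv : 1 ≤ v) (hj1 : 1 ≤ j) (hjmx : j ≤ mx)
    (hd : 1 ≤ d) (hguard : d * d ≤ v) (c : Array Int) (hlen : c.size = (mx + 1).toNat) :
    pvAGet (pvDivStep mx v c d) j
      = pvAGet c j + (if j ∣ v ∧ pvRep v j = d then 1 else 0) := by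
  have hmxc : ((mx + 1).toNat : Int) = mx + 1 := by omega
  unfold pvDivStep
  by_cases hmod : PySem.Int.mod v d = 0
  · rw [if_pos hmod]
    rw [PySem.Int.mod_eq_zero_iff_dvd] at hmod
    obtain ⟨e0, he0⟩ := hmod
    have he : PySem.Int.floordiv v d = e0 := pv_fdiv_exact hd e0 he0
    have he1 : 1 ≤ e0 := by
      have h0 : 0 < d * e0 := by rw [← he0]; omega
      rcases mul_pos_iff.mp h0 with ⟨_, h⟩ | ⟨h, _⟩ <;> omega
    have hde : d ≤ e0 := by nlinarith
    rw [he]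
    set ca : Array Int :=
      if d ≤ mx then pvASet c d (pvAGet c d + 1) else c with hca
    have hcalen : ca.size = (mx + 1).toNat := by
      rw [hca]; split_ifs <;> simpa [pvASet, Array.size_setIfInBounds] using hlen
    have hcaget : ∀ k : Int, 0 ≤ k →
        pvAGet ca k = pvAGet c k + (if k = d ∧ d ≤ mx then 1 else 0) := by
      intro k hk
      rw [hca]
      by_cases hdmx : d ≤ mx
      · rw [if_pos hdmx, pv_get_set c d k (pvAGet c d + 1) (by omega) (by rw [hlen]; omega) hk]
        by_cases hkd : k = d
        · simp [hkd, hdmx]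
        · simp [hkd]
      · simp [hdmx]
    by_cases h1 : e0 ≠ d ∧ e0 ≤ mx
    · rw [if_pos h1,
          pv_get_set ca e0 j (pvAGet ca e0 + 1) (by omega) (by rw [hcalen]; omega) (by omega)]
      by_cases hje : j = e0
      · -- j = e0 ≠ d: recorded by the second update; rep j = d
        have hdlt : d < e0 := lt_of_le_of_ne hde (Ne.symm h1.1)
        have hrep : pvRep v j = d := by
          unfold pvRep
          rw [if_neg (by subst hje; nlinarith)]
          exact pv_fdiv_exact hj1 d (by rw [he0, hje]; ring)
        rw [if_pos hje, hcaget e0 (by omega),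
            if_neg (by rintro ⟨h, _⟩; exact h1.1 h),
            if_pos ⟨⟨d, by rw [he0, hje]; ring⟩, hrep⟩, hje]
        ring
      · rw [if_neg hje, hcaget j (by omega)]
        by_cases hjd : j = d
        · -- j = d: recorded by the first update; rep j = d
          have hrep : pvRep v j = d := by
            unfold pvRep
            rw [if_pos (by subst hjd; exact hguard)]
            exact hjd
          rw [if_pos ⟨hjd, by omega⟩, if_pos ⟨by rw [hjd]; exact ⟨e0, he0⟩, hrep⟩]
        · -- j ∉ {d, e0}: untouched and rep j ≠ d
          have hind : ¬ (j ∣ v ∧ pvRep v j = d) := by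
            rintro ⟨hdvdj, hrep⟩
            unfold pvRep at hrep
            by_cases hjj : j * j ≤ v
            · rw [if_pos hjj] at hrep; exact hjd hrep
            · rw [if_neg hjj] at hrep
              obtain ⟨q, hq⟩ := hdvdj
              rw [pv_fdiv_exact hj1 q hq] at hrep
              -- q = d and v = j*q = d*e0 ⇒ j = e0
              apply hje
              have hc : d * j = d * e0 := by rw [← he0, hq, hrep]; ring
              exact mul_left_cancel₀ (by omega) hc
          rw [if_neg (by rintro ⟨h, _⟩; exact hjd h), if_neg hind]
    · rw [if_neg h1]
      rw [hcaget j (by omega)]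
      -- here e0 = d or e0 > mx; only the d-record can concern j
      by_cases hjd : j = d
      · have hrep : pvRep v j = d := by
          unfold pvRep
          rw [if_pos (by subst hjd; exact hguard)]
          exact hjd
        rw [if_pos ⟨hjd, by omega⟩, if_pos ⟨by rw [hjd]; exact ⟨e0, he0⟩, hrep⟩]
      · have hind : ¬ (j ∣ v ∧ pvRep v j = d) := by
          rintro ⟨hdvdj, hrep⟩
          unfold pvRep at hrep
          by_cases hjj : j * j ≤ v
          · rw [if_pos hjj] at hrep; exact hjd hrep
          · rw [if_neg hjj] at hrep
            obtain ⟨q, hq⟩ := hdvdj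
            rw [pv_fdiv_exact hj1 q hq] at hrep
            have hje0 : j = e0 := by
              have hc : d * j = d * e0 := by rw [← he0, hq, hrep]; ring
              exact mul_left_cancel₀ (by omega) hc
            -- then e0 = j ≤ mx and e0 ≠ d (else j = d), contradicting ¬h1
            exact h1 ⟨by omega, by omega⟩
        rw [if_neg (by rintro ⟨h, _⟩; exact hjd h), if_neg hind]
  · have hind : ¬ (j ∣ v ∧ pvRep v j = d) := by
      rintro ⟨hdvdj, hrep⟩
      apply hmod
      rw [PySem.Int.mod_eq_zero_iff_dvd]
      unfold pvRep at hrep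
      by_cases hjj : j * j ≤ v
      · rw [if_pos hjj] at hrep
        rw [← hrep]; exact hdvdj
      · rw [if_neg hjj] at hrep
        obtain ⟨q, hq⟩ := hdvdj
        rw [pv_fdiv_exact hj1 q hq] at hrep
        exact ⟨j, by rw [hq, ← hrep]; ring⟩
    rw [if_neg hmod, if_neg hind]
    omega

lemma pv_divloop_len (mx v : Int) :
    ∀ (n : Nat) (c : Array Int) (d : Int), (v + 1 - d).toNat ≤ n →
    (pvDivLoop mx v c d).size = c.size := by
  intro n
  induction n with
  | zero =>
    intro c d hn
    rw [pvDivLoop, dif_neg (by intro hg; have := pv_meas v d hg; omega)]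
  | succ n ih =>
    intro c d hn
    rw [pvDivLoop]
    by_cases hg : d * d ≤ v
    · rw [dif_pos hg, ih _ (d + 1) (by have := pv_meas v d hg; omega), pv_step_len]
    · rw [dif_neg hg]

-- the whole loop from index d adds the indicator 'j ∣ v with recording index ≥ d'
lemma pv_divloop_get (mx v j : Int) (hv : 1 ≤ v) (hj1 : 1 ≤ j) (hjmx : j ≤ mx) :
    ∀ (n : Nat) (c : Array Int) (d : Int), 1 ≤ d → (v + 1 - d).toNat ≤ n →
    c.size = (mx + 1).toNat →
    pvAGet (pvDivLoop mx v c d) j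
      = pvAGet c j + (if j ∣ v ∧ d ≤ pvRep v j then 1 else 0) := by
  intro n
  induction n with
  | zero =>
    intro c d hd hn hlen
    have hg : ¬ d * d ≤ v := by intro hg; have := pv_meas v d hg; omega
    rw [pvDivLoop, dif_neg hg, if_neg (pv_tail_zero hv hj1 hd hg)]
    ring
  | succ n ih =>
    intro c d hd hn hlen
    rw [pvDivLoop]
    by_cases hg : d * d ≤ v
    · rw [dif_pos hg,
          ih (pvDivStep mx v c d) (d + 1) (by omega)
            (by have := pv_meas v d hg; omega) (by rw [pv_step_len, hlen]),
          pv_step_get mx v j d hv hj1 hjmx hd hg c hlen]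
      by_cases hdv : j ∣ v
      · simp only [hdv, true_and]
        split_ifs <;> omega
      · simp [hdv]
    · rw [dif_neg hg, if_neg (pv_tail_zero hv hj1 hd hg)]
      ring

-- each position of a nodup in-range index list is incremented exactly once
lemma pv_incr_fold : ∀ (r : List Int), r.Nodup →
    ∀ (c : Array Int), (∀ k ∈ r, 0 ≤ k ∧ k < (c.size : Int)) →
    ∀ j : Int, 0 ≤ j →
    pvAGet (r.foldl (fun c d => pvASet c d (pvAGet c d + 1)) c) j
      = pvAGet c j + (if j ∈ r then 1 else 0) := by
  intro r
  induction r with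
  | nil => intro _ c _ j _; simp
  | cons a t ih =>
    intro hnd c hk j hj
    have ha := hk a List.mem_cons_self
    simp only [List.foldl_cons]
    rw [ih (List.nodup_cons.mp hnd).2 _
          (fun k hk' => by
            have := hk k (List.mem_cons_of_mem a hk')
            simpa [pvASet, Array.size_setIfInBounds] using this) j hj,
        pv_get_set c a j (pvAGet c a + 1) ha.1 ha.2 hj]
    by_cases hja : j = a
    · subst hja
      simp [(List.nodup_cons.mp hnd).1]
    · simp [hja]

lemma pv_fold_set_len : ∀ (r : List Int) (c : Array Int),
    (r.foldl (fun c d => pvASet c d (pvAGet c d + 1)) c).size = c.size := by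
  intro r
  induction r with
  | nil => intro c; rfl
  | cons a t ih =>
    intro c
    simp only [List.foldl_cons]
    rw [ih]
    simp [pvASet, Array.size_setIfInBounds]

lemma pv_elem_len (mx : Int) (c : Array Int) (b : Int) :
    (pvElemStep mx c b).size = c.size := by
  unfold pvElemStep
  by_cases h : |b| = 0
  · rw [if_pos h, pv_fold_set_len]
  · rw [if_neg h, pv_divloop_len mx |b| (|b| + 1 - 1).toNat c 1 le_rfl]

-- processing one entry adds the indicator 'b divisible by j'
lemma pv_elem_get (mx j b : Int) (hj1 : 1 ≤ j) (hjmx : j ≤ mx)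
    (c : Array Int) (hlen : c.size = (mx + 1).toNat) :
    pvAGet (pvElemStep mx c b) j
      = pvAGet c j + (if PySem.Int.mod b j = 0 then 1 else 0) := by
  unfold pvElemStep
  by_cases hb0 : |b| = 0
  · rw [if_pos hb0]
    have hb : b = 0 := abs_eq_zero.mp hb0
    have hmem : ∀ k : Int, k ∈ PySem.List.pyRange 1 (mx + 1) 1 ↔ 1 ≤ k ∧ k ≤ mx := by
      intro k
      rw [pv_mem_mult (le_refl 1)]
      simp
    rw [pv_incr_fold _ (pv_nodup_mult 1 mx one_pos) c
          (fun k hk => by rw [hmem k] at hk; rw [hlen]; omega) j (by omega),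
        if_pos ((hmem j).mpr ⟨hj1, hjmx⟩),
        if_pos (by rw [PySem.Int.mod_eq_zero_iff_dvd, hb]; exact dvd_zero j)]
  · rw [if_neg hb0]
    have hv : 1 ≤ |b| := by have := abs_nonneg b; omega
    rw [pv_divloop_get mx |b| j hv hj1 hjmx (|b| + 1 - 1).toNat c 1 le_rfl le_rfl hlen]
    have hdvd_iff : j ∣ |b| ↔ PySem.Int.mod b j = 0 := by
      rw [PySem.Int.mod_eq_zero_iff_dvd]; exact dvd_abs j b
    have hiff : (j ∣ |b| ∧ 1 ≤ pvRep |b| j) ↔ PySem.Int.mod b j = 0 := by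
      constructor
      · rintro ⟨h, _⟩; exact hdvd_iff.mp h
      · intro h
        have h' : j ∣ |b| := hdvd_iff.mpr h
        refine ⟨h', ?_⟩
        unfold pvRep
        by_cases hjj : j * j ≤ |b|
        · rw [if_pos hjj]; omega
        · rw [if_neg hjj]
          obtain ⟨q, hq⟩ := h'
          rw [pv_fdiv_exact hj1 q hq]
          have h0 : 0 < j * q := by rw [← hq]; omega
          rcases mul_pos_iff.mp h0 with ⟨_, hh⟩ | ⟨hh, _⟩ <;> omega
    simp only [hiff]

-- the row's count array at j equals the number of row entries divisible by j
lemma pv_row_get (mx j : Int) (hj1 : 1 ≤ j) (hjmx : j ≤ mx) (row : List Int) :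
    ∀ c : Array Int, c.size = (mx + 1).toNat →
    pvAGet (row.foldl (pvElemStep mx) c) j
      = pvAGet c j
        + (row.countP (fun b => decide (PySem.Int.mod b j = 0)) : Int) := by
  induction row with
  | nil => intro c _; simp
  | cons b t ih =>
    intro c hlen
    simp only [List.foldl_cons]
    rw [ih _ (by rw [pv_elem_len, hlen]), pv_elem_get mx j b hj1 hjmx c hlen,
        List.countP_cons]
    by_cases h : PySem.Int.mod b j = 0
    · simp only [h, decide_true, if_true]
      push_cast
      ring
    · simp only [h, decide_false, if_false]
      push_cast
      omega

lemma pv_row_eq (mx j : Int) (row : List Int) (hj : 1 ≤ j) (hjmx : j ≤ mx) :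
    pvAGet (row.foldl (pvElemStep mx) (Array.replicate (mx + 1).toNat 0)) j
      = row.foldl (fun c1 b => if PySem.Int.mod b j = 0 then c1 + 1 else c1) 0 := by
  rw [pv_row_get mx j hj hjmx row _ (by simp),
      PySem.List.foldl_ite_add_one (fun b => PySem.Int.mod b j = 0) row 0,
      pv_get_replicate]

-- ===== VERDICT (by name: the statement is the Claim_ definition above) =====
theorem countCoprime_spec : Claim_equal_countCoprime := by
  intro mat _ hpre
  obtain ⟨hne, hrows, r0, hr0, b0, hb0, hb1⟩ := hpre
  unfold Spec_countCoprime countCoprime countCoprime_alt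
  simp only [PySem.List.len_eq]
  congr 1
  apply PySem.List.foldl_congr_mem
  intro dp j hjmem
  have hj := PySem.List.mem_pyRange_neg_one.mp hjmem
  congr 2
  rw [PySem.List.foldl_pyRange_zero_pyGetD' mat []
        (fun cur row => PySem.Int.mod
          (cur * row.foldl (fun c1 b => if PySem.Int.mod b j = 0 then c1 + 1 else c1) 0)
          1000000007) 1,
      PySem.List.foldl_append_singleton_eq_map
        (fun row => row.foldl (pvElemStep (pvMx mat))
          (Array.replicate (pvMx mat + 1).toNat 0)) mat [],
      List.nil_append, List.foldl_map]
  congr 1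
  apply PySem.List.foldl_congr_mem
  intro cur row hrowmem
  rw [pv_row_eq (pvMx mat) j row (by omega) (by omega)]
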